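-- pv_equiv track=rewrite | github.com/ttped/spec_regen | app/ocr_to_table.py | _build_occupied_map
-- ===== SOURCE A (Python) =====
-- from typing import Dict, List, Optional, Tuple
--
-- def _build_occupied_map(
--     grid: List[List[Optional[Dict]]],
--     n_rows: int,
--     n_cols: int,
-- ) -> List[List[Optional[Tuple[int, int]]]]:
--     """
--     Build an occupation map: occupied[r][c] = (origin_r, origin_c) if
--     position (r, c) is covered by a spanning cell from that origin.
--
--     Every position touched by a cell (including the origin itself) is
--     recorded.  Positions with no cell at all remain None.
--     """
--     occupied: List[List[Optional[Tuple[int, int]]]] = [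
--         [None for _ in range(n_cols)] for _ in range(n_rows)
--     ]
--
--     for r in range(n_rows):
--         for c in range(n_cols):
--             cell = grid[r][c]
--             if cell is None:
--                 continue
--             rs = cell.get("row_span", 1)
--             cs = cell.get("col_span", 1)
--             for dr in range(rs):
--                 for dc in range(cs):
--                     rr, cc = r + dr, c + dc
--                     if rr < n_rows and cc < n_cols:
--                         occupied[rr][cc] = (r, c)
--
--     return occupied
-- ===== SOURCE B (Python) =====
-- def _build_occupied_map(grid, n_rows, n_cols):
--     """Query formulation: each output position is computed directly as the
--     latest (row-major) cell whose span covers it, with no mutable grid."""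
--
--     def covers(r, c, rr, cc):
--         cell = grid[r][c]
--         if cell is None:
--             return False
--         return (r <= rr < r + cell.get("row_span", 1)
--                 and c <= cc < c + cell.get("col_span", 1))
--
--     def owner(rr, cc):
--         best = None
--         for r in range(n_rows):
--             for c in range(n_cols):
--                 if covers(r, c, rr, cc):
--                     best = (r, c)
--         return best
--
--     return [[owner(rr, cc) for cc in range(n_cols)] for rr in range(n_rows)]
-- ===== Notes on version B (the rewrite author's own statement) =====
-- stated objective: alternative
-- what changed: B inverts the computation: instead of stamping each cell's span onto a preallocated mutable 2D grid (A), it computes each output position independently by scanning all cells and keeping the latest row-major cell whose span covers that position; Pre_ excludes only inputs where A raises IndexError (grid smaller than n_rows x n_cols while both are positive).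
import Mathlib
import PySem

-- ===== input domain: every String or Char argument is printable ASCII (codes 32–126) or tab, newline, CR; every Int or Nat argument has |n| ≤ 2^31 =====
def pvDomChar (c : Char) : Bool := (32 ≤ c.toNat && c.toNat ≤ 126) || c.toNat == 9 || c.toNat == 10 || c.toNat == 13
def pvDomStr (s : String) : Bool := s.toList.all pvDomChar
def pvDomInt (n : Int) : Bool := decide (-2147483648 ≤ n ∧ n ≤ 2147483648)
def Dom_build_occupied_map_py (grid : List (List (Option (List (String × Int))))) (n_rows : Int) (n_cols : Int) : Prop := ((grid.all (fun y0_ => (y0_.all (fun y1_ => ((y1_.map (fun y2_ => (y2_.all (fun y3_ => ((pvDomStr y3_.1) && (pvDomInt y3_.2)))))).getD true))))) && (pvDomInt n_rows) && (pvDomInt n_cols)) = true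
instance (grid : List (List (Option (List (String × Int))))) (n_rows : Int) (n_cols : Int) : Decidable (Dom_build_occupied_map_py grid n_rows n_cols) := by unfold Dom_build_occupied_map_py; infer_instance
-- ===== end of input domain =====

-- B inverts the computation: instead of stamping each cell's span onto a mutable 2D grid,
-- it computes every output position directly as the latest row-major cell covering it
-- (alternative decomposition, no mutation); return values proved equal on Pre_.

-- ===== PORT A =====
-- body of A's per-(r, c) loop iteration (transliteration of the loop body)
def pvAcell (grid : List (List (Option (List (String × Int))))) (n_rows n_cols : Int)
    (occ : List (List (Option (Int × Int)))) (r c : Int) : List (List (Option (Int × Int))) :=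
  match PySem.List.pyGetD (PySem.List.pyGetD grid r []) c none with
  | none => occ                                       -- `if cell is None: continue`
  | some cell =>
    let rs := PySem.Dict.getD ⟨cell⟩ "row_span" 1
    let cs := PySem.Dict.getD ⟨cell⟩ "col_span" 1
    (PySem.List.pyRange 0 rs 1).foldl (fun occ dr =>
      (PySem.List.pyRange 0 cs 1).foldl (fun occ dc =>
        if r + dr < n_rows ∧ c + dc < n_cols then
          PySem.List.pySetD occ (r + dr)
            (PySem.List.pySetD (PySem.List.pyGetD occ (r + dr) []) (c + dc) (some (r, c)))
        else occ) occ) occ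

def build_occupied_map_py (grid : List (List (Option (List (String × Int))))) (n_rows : Int) (n_cols : Int) : List (List (Option (Int × Int))) :=
  let occupied : List (List (Option (Int × Int))) :=
    (PySem.List.pyRange 0 n_rows 1).map (fun _ => (PySem.List.pyRange 0 n_cols 1).map (fun _ => none))
  (PySem.List.pyRange 0 n_rows 1).foldl (fun occ r =>
    (PySem.List.pyRange 0 n_cols 1).foldl (fun occ c => pvAcell grid n_rows n_cols occ r c) occ) occupied

-- ===== PORT B =====
-- `covers(r, c, rr, cc)` of Source B
def pvCovers (grid : List (List (Option (List (String × Int))))) (r c rr cc : Int) : Bool :=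
  match PySem.List.pyGetD (PySem.List.pyGetD grid r []) c none with
  | none => false                                     -- `if cell is None: return False`
  | some cell =>
    decide (r ≤ rr ∧ rr < r + PySem.Dict.getD ⟨cell⟩ "row_span" 1 ∧
            c ≤ cc ∧ cc < c + PySem.Dict.getD ⟨cell⟩ "col_span" 1)

-- `owner(rr, cc)` of Source B: forward scan keeping the latest covering cell
def pvOwner (grid : List (List (Option (List (String × Int))))) (n_rows n_cols rr cc : Int) : Option (Int × Int) :=
  (PySem.List.pyRange 0 n_rows 1).foldl (fun best r =>
    (PySem.List.pyRange 0 n_cols 1).foldl (fun best c =>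
      if pvCovers grid r c rr cc then some (r, c) else best) best) none

def build_occupied_map_py_alt (grid : List (List (Option (List (String × Int))))) (n_rows : Int) (n_cols : Int) : List (List (Option (Int × Int))) :=
  (PySem.List.pyRange 0 n_rows 1).map (fun rr =>
    (PySem.List.pyRange 0 n_cols 1).map (fun cc => pvOwner grid n_rows n_cols rr cc))

-- ===== PRECONDITION & SPEC =====
-- Pre_ excludes exactly the inputs where Python A raises IndexError reading grid[r][c]:
-- with positive n_rows and n_cols, the grid must have at least n_rows rows and each of
-- its first n_rows rows at least n_cols entries.
def Pre_build_occupied_map_py (grid : List (List (Option (List (String × Int))))) (n_rows : Int) (n_cols : Int) : Prop :=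
  0 < n_rows → 0 < n_cols →
    n_rows ≤ (grid.length : Int) ∧ ∀ row ∈ grid.take n_rows.toNat, n_cols ≤ (row.length : Int)
instance (grid : List (List (Option (List (String × Int))))) (n_rows : Int) (n_cols : Int) : Decidable (Pre_build_occupied_map_py grid n_rows n_cols) := by unfold Pre_build_occupied_map_py; infer_instance

def pvWitness_build_occupied_map_py : (List (List (Option (List (String × Int))))) × Int × Int :=
  ([[some [("row_span", 2), ("col_span", 2)], none], [none, some []]], 2, 2)

def Spec_build_occupied_map_py (grid : List (List (Option (List (String × Int))))) (n_rows : Int) (n_cols : Int) (out : List (List (Option (Int × Int)))) : Prop := out = build_occupied_map_py_alt grid n_rows n_cols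
instance (grid : List (List (Option (List (String × Int))))) (n_rows : Int) (n_cols : Int) (out : List (List (Option (Int × Int)))) : Decidable (Spec_build_occupied_map_py grid n_rows n_cols out) := by unfold Spec_build_occupied_map_py; infer_instance

-- ===== CLAIM (what is proved, stated in full; the proofs are below) =====
def Claim_equal_build_occupied_map_py : Prop := ∀ (grid : List (List (Option (List (String × Int))))) (n_rows : Int) (n_cols : Int), Dom_build_occupied_map_py grid n_rows n_cols → Pre_build_occupied_map_py grid n_rows n_cols → Spec_build_occupied_map_py grid n_rows n_cols (build_occupied_map_py grid n_rows n_cols)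

-- ===== LEMMAS AND PROOFS =====

-- the write a single covered position receives: position ↦ origin
def pvStepSet (occ : List (List (Option (Int × Int)))) (w : (Int × Int) × (Int × Int)) : List (List (Option (Int × Int))) :=
  PySem.List.pySetD occ w.1.1 (PySem.List.pySetD (PySem.List.pyGetD occ w.1.1 []) w.1.2 (some w.2))

-- the list of (position, origin) writes the cell at rc emits, in A's inner-loop order
def pvCellW (grid : List (List (Option (List (String × Int))))) (n_rows n_cols : Int)
    (rc : Int × Int) : List ((Int × Int) × (Int × Int)) :=
  match PySem.List.pyGetD (PySem.List.pyGetD grid rc.1 []) rc.2 none with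
  | none => []
  | some cell =>
    let rs := PySem.Dict.getD ⟨cell⟩ "row_span" 1
    let cs := PySem.Dict.getD ⟨cell⟩ "col_span" 1
    (PySem.List.pyRange 0 rs 1).flatMap (fun dr =>
      (PySem.List.pyRange 0 cs 1).flatMap (fun dc =>
        if rc.1 + dr < n_rows ∧ rc.2 + dc < n_cols then [((rc.1 + dr, rc.2 + dc), rc)] else []))

def pvCellsF (n_rows n_cols : Int) : List (Int × Int) :=
  (PySem.List.pyRange 0 n_rows 1).flatMap (fun r => (PySem.List.pyRange 0 n_cols 1).map (fun c => (r, c)))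

lemma pvAcell_eq (grid : List (List (Option (List (String × Int))))) (n_rows n_cols : Int)
    (occ : List (List (Option (Int × Int)))) (r c : Int) :
    pvAcell grid n_rows n_cols occ r c = (pvCellW grid n_rows n_cols (r, c)).foldl pvStepSet occ := by
  unfold pvAcell pvCellW
  cases hc : PySem.List.pyGetD (PySem.List.pyGetD grid r []) c none with
  | none => rfl
  | some cell =>
    have hinner : ∀ (occ : List (List (Option (Int × Int)))) (dr dc : Int),
        List.foldl pvStepSet occ
          (if r + dr < n_rows ∧ c + dc < n_cols then [((r + dr, c + dc), (r, c))] else []) =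
        if r + dr < n_rows ∧ c + dc < n_cols then
          PySem.List.pySetD occ (r + dr)
            (PySem.List.pySetD (PySem.List.pyGetD occ (r + dr) []) (c + dc) (some (r, c)))
        else occ := by
      intro occ dr dc; split <;> simp [pvStepSet]
    simp only [List.foldl_flatMap, hinner]

lemma pvBridgeA (grid : List (List (Option (List (String × Int))))) (n_rows n_cols : Int) :
    build_occupied_map_py grid n_rows n_cols =
      ((pvCellsF n_rows n_cols).flatMap (pvCellW grid n_rows n_cols)).foldl pvStepSet
        ((PySem.List.pyRange 0 n_rows 1).map (fun _ => (PySem.List.pyRange 0 n_cols 1).map (fun _ => none))) := by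
  unfold build_occupied_map_py pvCellsF
  simp only [List.foldl_flatMap, List.foldl_map, pvAcell_eq]

def pvShape (occ : List (List (Option (Int × Int)))) (R C : Nat) : Prop :=
  occ.length = R ∧ ∀ row ∈ occ, row.length = C

def pvVal (occ : List (List (Option (Int × Int)))) (i j : Nat) : Option (Int × Int) :=
  (occ.getD i []).getD j none

def pvLast (W : List ((Int × Int) × (Int × Int))) (p : Int × Int) (base : Option (Int × Int)) : Option (Int × Int) :=
  W.foldl (fun acc w => if w.1 = p then some w.2 else acc) base

lemma pvStepSet_eq (occ : List (List (Option (Int × Int)))) (a b : Nat) (v : Int × Int) :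
    pvStepSet occ (((a : Int), (b : Int)), v) = occ.set a ((occ.getD a []).set b (some v)) := by
  simp [pvStepSet]

lemma pvShape_stepSet {occ : List (List (Option (Int × Int)))} {R C : Nat}
    (hs : pvShape occ R C) (w : (Int × Int) × (Int × Int)) (h1 : 0 ≤ w.1.1) (h2 : 0 ≤ w.1.2) :
    pvShape (pvStepSet occ w) R C := by
  obtain ⟨a, ha⟩ : ∃ a : Nat, w.1.1 = (a : Int) := ⟨w.1.1.toNat, by omega⟩
  obtain ⟨b, hb⟩ : ∃ b : Nat, w.1.2 = (b : Int) := ⟨w.1.2.toNat, by omega⟩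
  have hweq : w = (((a : Int), (b : Int)), w.2) := by
    obtain ⟨⟨x, y⟩, v⟩ := w; simp_all
  rw [hweq, pvStepSet_eq]
  by_cases hal : a < occ.length
  · refine ⟨by simpa using hs.1, ?_⟩
    intro row hrow
    rw [List.mem_iff_getElem] at hrow
    obtain ⟨i, hil, hrow⟩ := hrow
    rw [List.getElem_set] at hrow
    split at hrow
    · rw [← hrow, List.length_set, List.getD_eq_getElem _ _ hal]
      exact hs.2 _ (List.getElem_mem hal)
    · rw [← hrow]
      exact hs.2 _ (List.getElem_mem (by simpa using hil))
  · rw [List.set_eq_of_length_le (by omega)]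
    exact hs

lemma pvVal_stepSet {occ : List (List (Option (Int × Int)))} {R C : Nat}
    (hs : pvShape occ R C) (w : (Int × Int) × (Int × Int))
    (hw : 0 ≤ w.1.1 ∧ w.1.1 < (R : Int) ∧ 0 ≤ w.1.2 ∧ w.1.2 < (C : Int))
    (i j : Nat) (hi : i < R) (hj : j < C) :
    pvVal (pvStepSet occ w) i j = if w.1 = ((i : Int), (j : Int)) then some w.2 else pvVal occ i j := by
  obtain ⟨a, ha⟩ : ∃ a : Nat, w.1.1 = (a : Int) := ⟨w.1.1.toNat, by omega⟩
  obtain ⟨b, hb⟩ : ∃ b : Nat, w.1.2 = (b : Int) := ⟨w.1.2.toNat, by omega⟩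
  have hweq : w = (((a : Int), (b : Int)), w.2) := by
    obtain ⟨⟨x, y⟩, v⟩ := w; simp_all
  have haR : a < R := by
    have := hw.2.1; rw [ha] at this; exact_mod_cast this
  have hbC : b < C := by
    have := hw.2.2.2; rw [hb] at this; exact_mod_cast this
  have hlen := hs.1
  have hal : a < occ.length := by omega
  have hil : i < occ.length := by omega
  have hAlen : (occ.getD a []).length = C := by
    rw [List.getD_eq_getElem _ _ hal]; exact hs.2 _ (List.getElem_mem hal)
  rw [hweq, pvStepSet_eq, pvVal,
    List.getD_eq_getElem (occ.set a ((occ.getD a []).set b (some w.2))) []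
      (by simpa using hil), List.getElem_set]
  by_cases hai : a = i
  · subst hai
    rw [if_pos rfl, List.getD_eq_getElem _ _ (by rw [List.length_set, hAlen]; exact hj),
      List.getElem_set]
    by_cases hbj : b = j
    · subst hbj
      rw [if_pos rfl, if_pos (by simp)]
    · rw [if_neg hbj, if_neg (by simp [Prod.ext_iff]; omega), pvVal]
      exact (List.getD_eq_getElem _ _ (by rw [hAlen]; exact hj)).symm
  · rw [if_neg hai, if_neg (by simp [Prod.ext_iff]; omega), pvVal,
      List.getD_eq_getElem occ [] hil]

lemma pvShape_foldl {R C : Nat} : ∀ (W : List ((Int × Int) × (Int × Int))) (occ : List (List (Option (Int × Int)))),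
    pvShape occ R C → (∀ w ∈ W, 0 ≤ w.1.1 ∧ 0 ≤ w.1.2) → pvShape (W.foldl pvStepSet occ) R C := by
  intro W
  induction W with
  | nil => intro occ hs _; exact hs
  | cons w W ih =>
    intro occ hs hb
    exact ih _ (pvShape_stepSet hs w (hb w (by simp)).1 (hb w (by simp)).2)
      (fun w' hw' => hb w' (by simp [hw']))

lemma pvVal_foldl {R C : Nat} : ∀ (W : List ((Int × Int) × (Int × Int))) (occ : List (List (Option (Int × Int)))),
    pvShape occ R C →
    (∀ w ∈ W, 0 ≤ w.1.1 ∧ w.1.1 < (R : Int) ∧ 0 ≤ w.1.2 ∧ w.1.2 < (C : Int)) →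
    ∀ i j, i < R → j < C →
      pvVal (W.foldl pvStepSet occ) i j = pvLast W ((i : Int), (j : Int)) (pvVal occ i j) := by
  intro W
  induction W with
  | nil => intro occ _ _ i j _ _; rfl
  | cons w W ih =>
    intro occ hs hb i j hi hj
    have hw := hb w (by simp)
    rw [List.foldl_cons,
      ih _ (pvShape_stepSet hs w hw.1 hw.2.2.1) (fun w' hw' => hb w' (by simp [hw'])) i j hi hj,
      pvVal_stepSet hs w hw i j hi hj]
    rfl

lemma pvMem_ifSingleton {α : Type} {P : Prop} [Decidable P] {a x : α}
    (h : x ∈ (if P then [a] else ([] : List α))) : P ∧ x = a := by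
  split at h <;> simp_all

lemma pvWf_bounds (grid : List (List (Option (List (String × Int))))) (n_rows n_cols : Int) :
    ∀ w ∈ (pvCellsF n_rows n_cols).flatMap (pvCellW grid n_rows n_cols),
      0 ≤ w.1.1 ∧ w.1.1 < n_rows ∧ 0 ≤ w.1.2 ∧ w.1.2 < n_cols := by
  intro w hw
  rw [List.mem_flatMap] at hw
  obtain ⟨rc, hrc, hw⟩ := hw
  have hrc2 : 0 ≤ rc.1 ∧ 0 ≤ rc.2 := by
    rw [pvCellsF, List.mem_flatMap] at hrc
    obtain ⟨r, hr, hrc⟩ := hrc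
    rw [List.mem_map] at hrc
    obtain ⟨c, hc, rfl⟩ := hrc
    rw [PySem.List.mem_pyRange_one] at hr hc
    exact ⟨hr.1, hc.1⟩
  rw [pvCellW] at hw
  split at hw
  · simp at hw
  · rw [List.mem_flatMap] at hw
    obtain ⟨dr, hdr, hw⟩ := hw
    rw [List.mem_flatMap] at hw
    obtain ⟨dc, hdc, hw⟩ := hw
    obtain ⟨hcond, rfl⟩ := pvMem_ifSingleton hw
    rw [PySem.List.mem_pyRange_one] at hdr hdc
    constructor
    · simp; omega
    constructor
    · simpa using hcond.1
    constructor
    · simp; omega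
    · simpa using hcond.2

-- last-write-wins over a list whose writes all carry the same value v
lemma pvLast_const : ∀ (L : List ((Int × Int) × (Int × Int))) (v : Int × Int) (p : Int × Int)
    (base : Option (Int × Int)), (∀ w ∈ L, w.2 = v) →
    pvLast L p base = if L.any (fun w => decide (w.1 = p)) then some v else base := by
  intro L
  induction L with
  | nil => intro v p base _; simp [pvLast]
  | cons w t ih =>
    intro v p base hv
    have hcons : pvLast (w :: t) p base = pvLast t p (if w.1 = p then some w.2 else base) := rfl
    rw [hcons, ih v p _ (fun w' hw' => hv w' (by simp [hw']))]
    by_cases hany : t.any (fun w => decide (w.1 = p))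
    · simp [hany]
    · by_cases hp : w.1 = p
      · simp [hany, hp, hv w (by simp)]
      · simp [hany, hp]

-- the cell at rc emits a write to position p iff Source B's `covers` holds (positions in range)
lemma pvAny_cellW (grid : List (List (Option (List (String × Int))))) (n_rows n_cols : Int)
    (rc : Int × Int) (p : Int × Int) (hp1 : p.1 < n_rows) (hp2 : p.2 < n_cols) :
    (pvCellW grid n_rows n_cols rc).any (fun w => decide (w.1 = p)) =
      pvCovers grid rc.1 rc.2 p.1 p.2 := by
  rw [Bool.eq_iff_iff, List.any_eq_true]
  unfold pvCellW pvCovers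
  cases hc : PySem.List.pyGetD (PySem.List.pyGetD grid rc.1 []) rc.2 none with
  | none => simp
  | some cell =>
    simp only [List.mem_flatMap, decide_eq_true_eq, PySem.List.mem_pyRange_one]
    constructor
    · rintro ⟨w, ⟨dr, hdr, dc, hdc, hw⟩, hwp⟩
      obtain ⟨_, rfl⟩ := pvMem_ifSingleton hw
      rw [Prod.ext_iff] at hwp
      simp only [] at hwp
      obtain ⟨h1, h2⟩ := hwp
      refine ⟨by omega, by omega, by omega, by omega⟩
    · intro hcov
      refine ⟨((rc.1 + (p.1 - rc.1), rc.2 + (p.2 - rc.2)), rc),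
        ⟨p.1 - rc.1, by omega, p.2 - rc.2, by omega, ?_⟩, by simp⟩
      rw [if_pos (by omega)]
      simp

lemma pvLast_cellW (grid : List (List (Option (List (String × Int))))) (n_rows n_cols : Int)
    (rc : Int × Int) (p : Int × Int) (hp1 : p.1 < n_rows) (hp2 : p.2 < n_cols)
    (base : Option (Int × Int)) :
    pvLast (pvCellW grid n_rows n_cols rc) p base =
      if pvCovers grid rc.1 rc.2 p.1 p.2 then some rc else base := by
  have hv : ∀ w ∈ pvCellW grid n_rows n_cols rc, w.2 = rc := by
    intro w hw
    rw [pvCellW] at hw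
    split at hw
    · simp at hw
    · rw [List.mem_flatMap] at hw
      obtain ⟨dr, _, hw⟩ := hw
      rw [List.mem_flatMap] at hw
      obtain ⟨dc, _, hw⟩ := hw
      obtain ⟨_, rfl⟩ := pvMem_ifSingleton hw
      rfl
  rw [pvLast_const _ rc p base hv, pvAny_cellW grid n_rows n_cols rc p hp1 hp2]

-- B's owner as a fold over the flat forward cell list
lemma pvOwner_foldl (grid : List (List (Option (List (String × Int))))) (n_rows n_cols rr cc : Int) :
    pvOwner grid n_rows n_cols rr cc =
      (pvCellsF n_rows n_cols).foldl
        (fun best rc => if pvCovers grid rc.1 rc.2 rr cc then some rc else best) none := by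
  unfold pvOwner pvCellsF
  simp only [List.foldl_flatMap, List.foldl_map]

-- last write to p over all cells = B's owner scan
lemma pvLast_flat (grid : List (List (Option (List (String × Int))))) (n_rows n_cols : Int)
    (p : Int × Int) (hp1 : p.1 < n_rows) (hp2 : p.2 < n_cols) :
    pvLast ((pvCellsF n_rows n_cols).flatMap (pvCellW grid n_rows n_cols)) p none =
      pvOwner grid n_rows n_cols p.1 p.2 := by
  rw [pvOwner_foldl, pvLast, List.foldl_flatMap]
  congr 1
  funext acc rc
  exact pvLast_cellW grid n_rows n_cols rc p hp1 hp2 acc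

-- ===== VERDICT (by name: the statement is the Claim_ definition above) =====
theorem build_occupied_map_py_spec : Claim_equal_build_occupied_map_py := by
  intro grid nr nc _hdom _hpre
  unfold Spec_build_occupied_map_py
  rw [pvBridgeA]
  have hb := pvWf_bounds grid nr nc
  set W : List ((Int × Int) × (Int × Int)) := (pvCellsF nr nc).flatMap (pvCellW grid nr nc) with hW
  set occ0 : List (List (Option (Int × Int))) := (PySem.List.pyRange 0 nr 1).map
    (fun _ => (PySem.List.pyRange 0 nc 1).map (fun _ => (none : Option (Int × Int)))) with hocc0
  set X : List (List (Option (Int × Int))) := W.foldl pvStepSet occ0 with hX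
  have hsh0 : pvShape occ0 nr.toNat nc.toNat := by
    constructor
    · simp [hocc0, PySem.List.length_pyRange_one]
    · intro row hrow
      rw [hocc0, List.mem_map] at hrow
      obtain ⟨_, _, rfl⟩ := hrow
      simp [PySem.List.length_pyRange_one]
  have hshF : pvShape X nr.toNat nc.toNat :=
    pvShape_foldl _ _ hsh0 (fun w hw => ⟨(hb w hw).1, (hb w hw).2.2.1⟩)
  apply List.ext_getElem
  · rw [hshF.1]; simp [build_occupied_map_py_alt, PySem.List.length_pyRange_one]
  · intro i h1 h2
    have hiR : i < nr.toNat := by rw [← hshF.1]; exact h1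
    apply List.ext_getElem
    · rw [hshF.2 _ (List.getElem_mem h1)]
      simp [build_occupied_map_py_alt, PySem.List.length_pyRange_one]
    · intro j hj1 hj2
      have hjC : j < nc.toNat := by
        rw [← hshF.2 _ (List.getElem_mem h1)]; exact hj1
      have hWbounds : ∀ w ∈ W,
          0 ≤ w.1.1 ∧ w.1.1 < (nr.toNat : Int) ∧ 0 ≤ w.1.2 ∧ w.1.2 < (nc.toNat : Int) := by
        intro w hw
        have h := hb w hw
        exact ⟨h.1, by omega, h.2.2.1, by omega⟩
      have hmain := pvVal_foldl W occ0 hsh0 hWbounds i j hiR hjC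
      have hval0 : pvVal occ0 i j = none := by
        rw [pvVal]
        rw [List.getD_eq_getElem occ0 [] (by rw [hsh0.1]; exact hiR)]
        simp only [hocc0, List.getElem_map]
        rw [List.getD_eq_getElem _ _ (by simpa [PySem.List.length_pyRange_one] using hjC)]
        simp
      rw [hval0] at hmain
      rw [pvVal, List.getD_eq_getElem X [] h1] at hmain
      rw [List.getD_eq_getElem _ _ hj1] at hmain
      refine hmain.trans ?_
      have hlast := pvLast_flat grid nr nc ((i : Int), (j : Int)) (by simp; omega) (by simp; omega)
      rw [← hW] at hlast
      rw [hlast]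
      simp [build_occupied_map_py_alt, PySem.List.getElem_pyRange_one]
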